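-- pv_equiv track=rewrite | github.com/organic-programming/seed | sdk/python-holons/holons/observability.py | _parse_op_obs
-- ===== SOURCE A (Python) =====
-- import enum
--
-- class Family(str, enum.Enum):
--     LOGS = "logs"
--     METRICS = "metrics"
--     EVENTS = "events"
--     PROM = "prom"
--     OTEL = "otel"  # reserved v2
--
-- _V1_TOKENS = {"logs", "metrics", "events", "prom", "all"}
--
-- def _parse_op_obs(raw: str) -> set[Family]:
--     out: set[Family] = set()
--     if not raw or not raw.strip():
--         return out
--     for tok in (t.strip() for t in raw.split(",")):
--         if not tok:
--             continue
--         if tok in {"otel", "sessions"}: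
--             # v2 reserved token; swallowed silently here, rejected by check_env.
--             continue
--         if tok not in _V1_TOKENS:
--             continue
--         if tok == "all":
--             out.update({Family.LOGS, Family.METRICS, Family.EVENTS, Family.PROM})
--         else:
--             out.add(Family(tok))
--     return out
-- ===== SOURCE B (Python) =====
-- import enum
--
-- class Family(str, enum.Enum):
--     LOGS = "logs"
--     METRICS = "metrics"
--     EVENTS = "events"
--     PROM = "prom"
--     OTEL = "otel"  # reserved v2
--
-- _V1_TOKENS = {"logs", "metrics", "events", "prom", "all"}
--
--
-- def _parse_op_obs(raw: str) -> set:
--     # One character-level pass: a tiny tokenizer state machine.  `word` holds the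
--     # current token trimmed on the fly, `pend` buffers interior whitespace that is
--     # only committed when a further non-space character arrives; a comma (or the
--     # sentinel comma appended at the end) flushes the finished word.
--     out = set()
--     word = ""
--     pend = ""
--     for ch in raw + ",":
--         if ch == ",":
--             if word == "all":
--                 out |= {Family.LOGS, Family.METRICS, Family.EVENTS, Family.PROM}
--             elif word in ("logs", "metrics", "events", "prom"):
--                 out.add(Family(word))
--             word = ""
--             pend = ""
--         elif ch.isspace():
--             if word:
--                 pend += ch
--         else:
--             word += pend + ch
--             pend = ""
--     return out
-- ===== Notes on version B (the rewrite author's own statement) =====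
-- stated objective: alternative
-- what changed: Replaces the split/strip/guard-chain token loop by a single character-level tokenizer state machine that trims whitespace on the fly (word/pend accumulators, flush on comma), never calling split or strip.
import Mathlib
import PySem

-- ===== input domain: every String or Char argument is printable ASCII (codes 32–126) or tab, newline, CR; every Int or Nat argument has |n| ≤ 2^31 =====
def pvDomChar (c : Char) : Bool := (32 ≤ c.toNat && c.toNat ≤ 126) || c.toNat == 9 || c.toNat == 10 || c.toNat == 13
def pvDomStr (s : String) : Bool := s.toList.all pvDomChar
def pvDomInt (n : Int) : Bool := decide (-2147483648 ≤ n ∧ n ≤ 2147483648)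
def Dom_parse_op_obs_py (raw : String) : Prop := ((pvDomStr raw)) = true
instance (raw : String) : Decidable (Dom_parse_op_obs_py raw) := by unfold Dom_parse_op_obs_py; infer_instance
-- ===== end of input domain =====

-- B replaces A's split/strip/guard-chain token loop by a single character-level tokenizer
-- state machine trimming whitespace on the fly (objective: alternative, same cost).
-- Family values are represented by their strings; the set result's list order is insertion order.

-- ===== PORT A =====
def parse_op_obs_py (raw : String) : List String :=
  let out : PySem.Set String := PySem.Set.empty
  if raw = "" || PySem.Str.strip raw = "" then out
  else
    -- raw.split(","): sep is the nonempty literal ",", so split? is never none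
    (((PySem.Str.split? raw ",").getD []).map (fun t => PySem.Str.strip t)).foldl
      (fun out tok =>
        if tok = "" then out
        else if (PySem.Set.ofList ["otel", "sessions"]).contains tok then out
        else if !((PySem.Set.ofList ["logs", "metrics", "events", "prom", "all"]).contains tok) then out
        else if tok = "all" then PySem.Set.update out ["logs", "metrics", "events", "prom"]
        else PySem.Set.add out tok) out

-- ===== PORT B =====
-- the comma branch of B's loop: flush the finished word into the set
def pvFlush (s : PySem.Set String) (w : List Char) : PySem.Set String :=
  if w = "all".toList then PySem.Set.update s ["logs", "metrics", "events", "prom"]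
  else if w = "logs".toList || w = "metrics".toList || w = "events".toList || w = "prom".toList then
    PySem.Set.add s (String.ofList w)
  else s

-- B's for-loop over the characters: state = (set, word, pend); the word/pend strings are
-- kept on the List Char side (PySem's string representation)
def pvScan : List Char → PySem.Set String → List Char → List Char → PySem.Set String
  | [], s, _, _ => s
  | c :: rest, s, w, p =>
    if c = ',' then pvScan rest (pvFlush s w) [] []
    else if PySem.Chars.isspace c then
      pvScan rest s w (if w ≠ [] then p ++ [c] else p)
    else pvScan rest s (w ++ p ++ [c]) []

def parse_op_obs_py_alt (raw : String) : List String :=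
  pvScan (raw.toList ++ [',']) PySem.Set.empty [] []

-- ===== PRECONDITION & SPEC =====
def Spec_parse_op_obs_py (raw : String) (out : List String) : Prop := out = parse_op_obs_py_alt raw
instance (raw : String) (out : List String) : Decidable (Spec_parse_op_obs_py raw out) := by unfold Spec_parse_op_obs_py; infer_instance

-- ===== CLAIM (what is proved, stated in full; the proofs are below) =====
def Claim_equal_parse_op_obs_py : Prop := ∀ (raw : String), Dom_parse_op_obs_py raw → Spec_parse_op_obs_py raw (parse_op_obs_py raw)

-- ===== LEMMAS AND PROOFS =====

-- comma-splitting by structural recursion (proof-side model of Chars.splitOn)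
def pvSp : List Char → List (List Char)
  | [] => [[]]
  | c :: rest => if c = ',' then [] :: pvSp rest else (pvSp rest).modifyHead (c :: ·)

-- the word produced by scanning a comma-free chunk from state (w, p) (mirrors pvScan)
def pvWordOf (w p : List Char) : List Char → List Char
  | [] => w
  | c :: t =>
    if PySem.Chars.isspace c then pvWordOf w (if w ≠ [] then p ++ [c] else p) t
    else pvWordOf (w ++ p ++ [c]) [] t

lemma pvSp_ne_nil (cs : List Char) : pvSp cs ≠ [] := by
  induction cs with
  | nil => simp [pvSp]
  | cons c rest ih =>
    simp only [pvSp]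
    split
    · simp
    · cases h : pvSp rest with
      | nil => exact absurd h ih
      | cons a l => simp

lemma go_eq_sp : ∀ (fuel : Nat) (cs cur : List Char) (acc : List (List Char)),
    cs.length ≤ fuel →
    PySem.Chars.splitOn.go [','] fuel cs cur acc
      = acc.reverse ++ (pvSp cs).modifyHead (cur.reverse ++ ·) := by
  intro fuel
  induction fuel with
  | zero =>
    intro cs cur acc h
    have : cs = [] := List.eq_nil_of_length_eq_zero (Nat.le_zero.mp h)
    subst this
    rw [PySem.Chars.splitOn.go.eq_def]
    simp [pvSp]
  | succ fuel ih =>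
    intro cs cur acc h
    rw [PySem.Chars.splitOn.go.eq_def]
    cases cs with
    | nil => simp [pvSp]
    | cons c rest =>
      by_cases hc : c = ','
      · subst hc
        have hpre : List.isPrefixOf [','] (',' :: rest) = true := by simp [List.isPrefixOf]
        simp only [hpre, if_true, List.length_cons, List.drop_succ_cons, List.length_nil, List.drop_zero]
        rw [ih rest [] (cur.reverse :: acc) (by simp at h; omega)]
        simp [pvSp]
        cases hsp : pvSp rest with
        | nil => exact absurd hsp (pvSp_ne_nil rest)
        | cons a l => simp
      · have hpre : List.isPrefixOf [','] (c :: rest) = false := by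
          simp [List.isPrefixOf]; exact fun hh => absurd hh.symm hc
        simp only [hpre]
        rw [ih rest (c :: cur) acc (by simp at h; omega)]
        simp only [pvSp, if_neg hc]
        cases hsp : pvSp rest with
        | nil => exact absurd hsp (pvSp_ne_nil rest)
        | cons a l => simp

lemma splitOn_eq_sp (cs : List Char) : PySem.Chars.splitOn cs [','] = pvSp cs := by
  rw [PySem.Chars.splitOn, go_eq_sp _ _ _ _ (by omega)]
  cases h : pvSp cs with
  | nil => exact absurd h (pvSp_ne_nil cs)
  | cons a l => simp

lemma rstrip_ws {p : List Char} (hp : ∀ c ∈ p, PySem.Chars.isspace c = true) :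
    PySem.Chars.rstrip p = [] := by
  simp [PySem.Chars.rstrip, List.dropWhile_eq_nil_iff]
  intro c hc
  exact hp c hc

lemma dropWhile_append_singleton {c : Char} (hc : PySem.Chars.isspace c = false)
    (l : List Char) :
    List.dropWhile PySem.Chars.isspace (l ++ [c])
      = List.dropWhile PySem.Chars.isspace l ++ [c] := by
  rw [List.dropWhile_append]
  split
  · rename_i h
    simp only [List.isEmpty_iff] at h
    simp [hc, h]
  · rfl

lemma rstrip_append_nonspace (p : List Char) {c : Char} (t : List Char)
    (hc : PySem.Chars.isspace c = false) :
    PySem.Chars.rstrip (p ++ c :: t) = p ++ c :: PySem.Chars.rstrip t := by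
  simp only [PySem.Chars.rstrip, List.reverse_append, List.reverse_cons]
  rw [List.dropWhile_append]
  split
  · rename_i h
    simp only [List.isEmpty_iff, List.dropWhile_eq_nil_iff] at h
    have := h c (by simp)
    simp [hc] at this
  · rw [dropWhile_append_singleton hc]
    simp

lemma wordOf_ne_nil {w : List Char} (p : List Char) (hw : w ≠ [])
    (hp : ∀ c ∈ p, PySem.Chars.isspace c = true)
    (t : List Char) : pvWordOf w p t = w ++ PySem.Chars.rstrip (p ++ t) := by
  induction t generalizing w p with
  | nil => simp [pvWordOf, rstrip_ws hp]
  | cons c t ih =>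
    simp only [pvWordOf]
    by_cases hc : PySem.Chars.isspace c = true
    · rw [if_pos hc, if_pos hw]
      rw [ih (p ++ [c]) hw (by
        intro x hx
        rcases List.mem_append.mp hx with h | h
        · exact hp x h
        · simp at h; subst h; exact hc)]
      simp
    · rw [if_neg hc, ih [] (by simp) (by simp)]
      rw [rstrip_append_nonspace p t (by simpa using hc)]
      simp

lemma wordOf_eq_strip (t : List Char) : pvWordOf [] [] t = PySem.Chars.strip t := by
  induction t with
  | nil => simp [pvWordOf, PySem.Chars.strip, PySem.Chars.lstrip, PySem.Chars.rstrip]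
  | cons c t ih =>
    by_cases hc : PySem.Chars.isspace c = true
    · simp only [pvWordOf, if_pos hc]
      rw [show (if ([] : List Char) ≠ [] then ([] : List Char) ++ [c] else []) = [] from by simp]
      rw [ih]
      simp [PySem.Chars.strip, PySem.Chars.lstrip, hc]
    · simp only [pvWordOf, if_neg hc]
      rw [wordOf_ne_nil [] (by simp) (by simp)]
      have hstrip : PySem.Chars.strip (c :: t) = c :: PySem.Chars.rstrip t := by
        have hlstrip : PySem.Chars.lstrip (c :: t) = c :: t := by
          simp [PySem.Chars.lstrip, hc]
        rw [PySem.Chars.strip, hlstrip]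
        simpa using rstrip_append_nonspace [] t (by simpa using hc)
      simp [hstrip]

lemma scan_eq_foldl : ∀ (cs : List Char) (s : PySem.Set String) (w p : List Char)
    (h : List Char) (ts : List (List Char)), pvSp cs = h :: ts →
    pvScan (cs ++ [',']) s w p
      = List.foldl pvFlush s (pvWordOf w p h :: ts.map (fun t => pvWordOf [] [] t)) := by
  intro cs
  induction cs with
  | nil =>
    intro s w p h ts hsp
    simp only [pvSp] at hsp
    cases hsp
    simp [pvScan, pvWordOf]
  | cons c rest ih =>
    intro s w p h ts hsp
    simp only [pvSp] at hsp
    by_cases hc : c = ','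
    · rw [if_pos hc] at hsp
      cases hsp
      subst hc
      simp only [List.cons_append, pvScan, if_pos]
      cases hsp' : pvSp rest with
      | nil => exact absurd hsp' (pvSp_ne_nil rest)
      | cons h' ts' =>
        rw [ih (pvFlush s w) [] [] h' ts' hsp']
        simp [pvWordOf, List.foldl_cons]
    · rw [if_neg hc] at hsp
      cases hsp' : pvSp rest with
      | nil => exact absurd hsp' (pvSp_ne_nil rest)
      | cons h' ts' =>
        rw [hsp'] at hsp
        simp only [List.modifyHead] at hsp
        injection hsp with h1 h2
        subst h1; subst h2
        simp only [List.cons_append, pvScan, if_neg hc]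
        by_cases hsp2 : PySem.Chars.isspace c = true
        · rw [if_pos hsp2]
          rw [ih s w (if w ≠ [] then p ++ [c] else p) h' ts' hsp']
          simp only [pvWordOf, if_pos hsp2]
        · rw [if_neg hsp2]
          rw [ih s (w ++ p ++ [c]) [] h' ts' hsp']
          simp only [pvWordOf, if_neg hsp2]

-- B's result, token-level view: fold the flush over the stripped tokens of the comma split
lemma alt_eq_foldl (raw : String) :
    parse_op_obs_py_alt raw
      = List.foldl pvFlush PySem.Set.empty
          ((pvSp raw.toList).map (fun t => PySem.Chars.strip t)) := by
  unfold parse_op_obs_py_alt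
  cases hsp : pvSp raw.toList with
  | nil => exact absurd hsp (pvSp_ne_nil raw.toList)
  | cons h ts =>
    rw [scan_eq_foldl raw.toList PySem.Set.empty [] [] h ts hsp]
    simp [wordOf_eq_strip]

-- A's loop body applied to a token is B's flush of the token's character list
lemma step_eq_flush (s : PySem.Set String) (tok : String) :
    (if tok = "" then s
     else if (PySem.Set.ofList ["otel", "sessions"]).contains tok then s
     else if !((PySem.Set.ofList ["logs", "metrics", "events", "prom", "all"]).contains tok) then s
     else if tok = "all" then PySem.Set.update s ["logs", "metrics", "events", "prom"]
     else PySem.Set.add s tok)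
      = pvFlush s tok.toList := by
  have htl : ∀ v : String, tok.toList = v.toList ↔ tok = v := by
    intro v
    exact ⟨fun h => String.toList_injective h, fun h => by rw [h]⟩
  by_cases h1 : tok = "all"
  · subst h1
    simp [pvFlush, PySem.Set.contains, PySem.Set.ofList]
  · by_cases h2 : tok = "logs" ∨ tok = "metrics" ∨ tok = "events" ∨ tok = "prom"
    · rcases h2 with h | h | h | h <;> subst h <;>
        simp [pvFlush, PySem.Set.contains, PySem.Set.ofList]
    · simp only [not_or] at h2
      obtain ⟨hl, hm, he, hp⟩ := h2
      have h1' : ¬tok.toList = ['a', 'l', 'l'] := by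
        rw [show (['a', 'l', 'l'] : List Char) = "all".toList from rfl, htl]; exact h1
      have hl' : ¬tok.toList = ['l', 'o', 'g', 's'] := by
        rw [show (['l', 'o', 'g', 's'] : List Char) = "logs".toList from rfl, htl]; exact hl
      have hm' : ¬tok.toList = ['m', 'e', 't', 'r', 'i', 'c', 's'] := by
        rw [show (['m', 'e', 't', 'r', 'i', 'c', 's'] : List Char) = "metrics".toList from rfl, htl]; exact hm
      have he' : ¬tok.toList = ['e', 'v', 'e', 'n', 't', 's'] := by
        rw [show (['e', 'v', 'e', 'n', 't', 's'] : List Char) = "events".toList from rfl, htl]; exact he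
      have hp' : ¬tok.toList = ['p', 'r', 'o', 'm'] := by
        rw [show (['p', 'r', 'o', 'm'] : List Char) = "prom".toList from rfl, htl]; exact hp
      simp [pvFlush, h1, hl, hm, he, hp, h1', hl', hm', he', hp',
        PySem.Set.contains, PySem.Set.ofList]

-- fold A's loop body over the String tokens = fold B's flush over the List Char tokens
lemma foldl_step_eq (l : List (List Char)) (s : PySem.Set String) :
    List.foldl
      (fun (out : PySem.Set String) (tok : String) =>
        if tok = "" then out
        else if (PySem.Set.ofList ["otel", "sessions"]).contains tok then out
        else if !((PySem.Set.ofList ["logs", "metrics", "events", "prom", "all"]).contains tok) then out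
        else if tok = "all" then PySem.Set.update out ["logs", "metrics", "events", "prom"]
        else PySem.Set.add out tok) s
      (l.map (fun t => String.ofList (PySem.Chars.strip t)))
      = List.foldl pvFlush s (l.map (fun t => PySem.Chars.strip t)) := by
  induction l generalizing s with
  | nil => rfl
  | cons t l ih =>
    simp only [List.map_cons, List.foldl_cons]
    rw [step_eq_flush s (String.ofList (PySem.Chars.strip t)), String.toList_ofList, ih]

-- a token of the comma split only contains characters of the input
lemma sp_chars (cs : List Char) : ∀ t ∈ pvSp cs, ∀ c ∈ t, c ∈ cs := by
  induction cs with
  | nil => intro t ht c hc; simp [pvSp] at ht; subst ht; simp at hc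
  | cons a rest ih =>
    intro t ht c hc
    simp only [pvSp] at ht
    by_cases ha : a = ','
    · rw [if_pos ha] at ht
      rcases List.mem_cons.mp ht with h | h
      · subst h; simp at hc
      · exact List.mem_cons_of_mem _ (ih t h c hc)
    · rw [if_neg ha] at ht
      cases hsp : pvSp rest with
      | nil => exact absurd hsp (pvSp_ne_nil rest)
      | cons h' ts' =>
        rw [hsp] at ht
        simp only [List.modifyHead] at ht
        rcases List.mem_cons.mp ht with h | h
        · subst h
          rcases List.mem_cons.mp hc with h | h
          · subst h; simp
          · exact List.mem_cons_of_mem _ (ih h' (by rw [hsp]; simp) c h)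
        · exact List.mem_cons_of_mem _ (ih t (by rw [hsp]; simp [h]) c hc)

-- a string whose strip is empty consists of whitespace only
lemma strip_eq_nil_imp (cs : List Char) (h : PySem.Chars.strip cs = []) :
    ∀ c ∈ cs, PySem.Chars.isspace c = true := by
  intro c hc
  simp only [PySem.Chars.strip, PySem.Chars.rstrip, PySem.Chars.lstrip] at h
  rw [List.reverse_eq_nil_iff, List.dropWhile_eq_nil_iff] at h
  by_cases hmem : c ∈ List.dropWhile PySem.Chars.isspace cs
  · exact h c (by simpa using hmem)
  · have := List.takeWhile_append_dropWhile (p := PySem.Chars.isspace) (l := cs)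
    have hc' : c ∈ List.takeWhile PySem.Chars.isspace cs ++ List.dropWhile PySem.Chars.isspace cs := by
      rw [this]; exact hc
    rcases List.mem_append.mp hc' with h' | h'
    · exact List.mem_takeWhile_imp h'
    · exact absurd h' hmem

lemma strip_ws {t : List Char} (ht : ∀ c ∈ t, PySem.Chars.isspace c = true) :
    PySem.Chars.strip t = [] := by
  rw [PySem.Chars.strip]
  apply rstrip_ws
  intro c hc
  exact ht c ((List.dropWhile_sublist _).mem hc)

lemma foldl_flush_nil (l : List (List Char)) (s : PySem.Set String)
    (hl : ∀ t ∈ l, PySem.Chars.strip t = []) :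
    List.foldl pvFlush s (l.map (fun t => PySem.Chars.strip t)) = s := by
  induction l generalizing s with
  | nil => rfl
  | cons t l ih =>
    simp only [List.map_cons, List.foldl_cons]
    rw [hl t (by simp)]
    rw [show pvFlush s [] = s from by simp [pvFlush]]
    exact ih s (fun t' ht' => hl t' (by simp [ht']))

-- ===== VERDICT (by name: the statement is the Claim_ definition above) =====
theorem parse_op_obs_py_spec : Claim_equal_parse_op_obs_py := by
  intro raw _
  unfold Spec_parse_op_obs_py
  rw [alt_eq_foldl raw]
  unfold parse_op_obs_py
  have hsplit : ((PySem.Str.split? raw ",").getD []).map (fun t => PySem.Str.strip t)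
      = (pvSp raw.toList).map (fun t => String.ofList (PySem.Chars.strip t)) := by
    have hs : PySem.Chars.split? raw.toList [','] = some (pvSp raw.toList) := by
      simp [PySem.Chars.split?, splitOn_eq_sp]
    simp only [PySem.Str.split?, show ("," : String).toList = [','] from rfl, hs,
      Option.map_some, Option.getD_some, List.map_map]
    apply List.map_congr_left
    intro t _
    simp only [Function.comp]
    apply String.toList_injective
    simp [PySem.Str.toList_strip]
  by_cases hguard : raw = "" ∨ PySem.Str.strip raw = ""
  · have hstrip : PySem.Str.strip raw = "" := by
      rcases hguard with h | h
      · subst h; rfl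
      · exact h
    rw [if_pos (by simp [hstrip])]
    have hspace : ∀ c ∈ raw.toList, PySem.Chars.isspace c = true := by
      apply strip_eq_nil_imp
      have := congrArg String.toList hstrip
      rwa [PySem.Str.toList_strip] at this
    rw [foldl_flush_nil _ _ (fun t ht => strip_ws (fun c hc => hspace c (sp_chars raw.toList t ht c hc)))]
  · rw [if_neg (by simpa using hguard)]
    rw [hsplit, foldl_step_eq]
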